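-- pv_equiv track=rewrite | github.com/sebaperez31/advent_of_code | 2024/day_09/compact_disk_part_2.py | find_empty_space
-- ===== SOURCE A (Python) =====
-- def find_empty_space(disk_array, blocks_needed):
--     i = 0
--     blocks = 0
--     while i < len(disk_array):
--         if disk_array[i] == -1:
--             blocks += 1
--             if blocks == blocks_needed:
--                 return i - blocks + 1
--         else:
--             blocks = 0
--         i += 1
--
--     return -1
-- ===== SOURCE B (Python) =====
-- def find_empty_space(disk_array, blocks_needed):
--     # Run-skipping search: jump to the start of each free run with list.index,
--     # measure the whole run once, and leap past it if it is too short.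
--     if blocks_needed < 1:
--         return -1
--     n = len(disk_array)
--     pos = 0
--     while True:
--         try:
--             start = disk_array.index(-1, pos)
--         except ValueError:
--             return -1
--         end = start + 1
--         while end < n and disk_array[end] == -1:
--             end += 1
--         if end - start >= blocks_needed:
--             return start
--         pos = end
-- ===== Notes on version B (the rewrite author's own statement) =====
-- stated objective: faster
-- what changed: Instead of A's cell-by-cell scan with a consecutive-free counter tested at every free cell, B works gap-at-a-time: it jumps to the start of each free run with list.index (a C-level scan), measures the whole run once, compares its length to blocks_needed a single time, and leaps past the run.
import Mathlib
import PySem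

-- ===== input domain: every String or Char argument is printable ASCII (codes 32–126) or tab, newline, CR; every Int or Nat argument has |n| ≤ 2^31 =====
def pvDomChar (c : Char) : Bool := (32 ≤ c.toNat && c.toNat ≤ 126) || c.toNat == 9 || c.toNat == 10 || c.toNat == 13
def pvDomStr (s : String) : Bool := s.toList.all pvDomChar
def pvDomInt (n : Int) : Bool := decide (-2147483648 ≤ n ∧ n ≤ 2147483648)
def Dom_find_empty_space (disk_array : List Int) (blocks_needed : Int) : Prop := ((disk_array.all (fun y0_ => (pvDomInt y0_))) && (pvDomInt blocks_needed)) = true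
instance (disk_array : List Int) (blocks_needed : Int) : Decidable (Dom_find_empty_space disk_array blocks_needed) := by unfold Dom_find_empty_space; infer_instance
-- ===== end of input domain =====

-- B replaces A's cell-by-cell counter scan with gap-at-a-time run skipping: jump to the next
-- free cell with list.index, measure the run once, leap past it if short (measured faster in Python).


-- ===== PORT A =====
-- A's while loop: `rest` is the suffix disk_array[i:], `i` the index, `blocks` the counter.
def goA (blocks_needed : Int) : List Int → Int → Int → Int
  | [], _, _ => -1
  | x :: rest, i, blocks =>
    if x = -1 then
      let blocks' := blocks + 1
      if blocks' = blocks_needed then i - blocks' + 1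
      else goA blocks_needed rest (i + 1) blocks'
    else goA blocks_needed rest (i + 1) 0

def find_empty_space (disk_array : List Int) (blocks_needed : Int) : Int :=
  goA blocks_needed disk_array 0 0

-- ===== PORT B =====
-- Source B's inner `while end < n and disk_array[end] == -1` run measurement, on the suffix.
def runLenB : List Int → Nat
  | [] => 0
  | x :: rest => if x = -1 then runLenB rest + 1 else 0

theorem runLenB_pos_of_head (x : Int) (rest : List Int) (hx : x = -1) :
    1 ≤ runLenB (x :: rest) := by simp [runLenB, hx]

-- Source B's outer `while True` loop on the suffix disk_array[pos:]: seek the next -1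
-- (list.index scan; empty suffix = ValueError → -1), measure the run, return or leap past it.
def goB (blocks_needed : Int) : List Int → Int → Int
  | [], _ => -1
  | x :: rest, pos =>
    if hx : x = -1 then
      let run := runLenB (x :: rest)
      if blocks_needed ≤ (run : Int) then pos
      else goB blocks_needed ((x :: rest).drop run) (pos + (run : Int))
    else goB blocks_needed rest (pos + 1)
termination_by l _ => l.length
decreasing_by
  · have h1 := runLenB_pos_of_head x rest hx
    simp only [List.length_drop, List.length_cons]
    omega
  · simp

def find_empty_space_alt (disk_array : List Int) (blocks_needed : Int) : Int :=
  if blocks_needed < 1 then -1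
  else goB blocks_needed disk_array 0

-- ===== PRECONDITION & SPEC =====
def Spec_find_empty_space (disk_array : List Int) (blocks_needed : Int) (out : Int) : Prop := out = find_empty_space_alt disk_array blocks_needed
instance (disk_array : List Int) (blocks_needed : Int) (out : Int) : Decidable (Spec_find_empty_space disk_array blocks_needed out) := by unfold Spec_find_empty_space; infer_instance

-- ===== CLAIM (what is proved, stated in full; the proofs are below) =====
def Claim_equal_find_empty_space : Prop := ∀ (disk_array : List Int) (blocks_needed : Int), Dom_find_empty_space disk_array blocks_needed → Spec_find_empty_space disk_array blocks_needed (find_empty_space disk_array blocks_needed)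

-- ===== LEMMAS AND PROOFS =====

-- If blocks_needed < 1, A's counter (always ≥ 1 when tested) never matches, so A returns -1.
theorem goA_neg (n : Int) (hn : n < 1) :
    ∀ (rest : List Int) (i blocks : Int), 0 ≤ blocks → goA n rest i blocks = -1 := by
  intro rest
  induction rest with
  | nil => intro i blocks _; rfl
  | cons x rest ih =>
    intro i blocks hb
    by_cases hx : x = -1
    · simp only [goA, if_pos hx]
      have : ¬ (blocks + 1 = n) := by omega
      simp only [if_neg this]
      exact ih (i + 1) (blocks + 1) (by omega)
    · simp only [goA, if_neg hx]
      exact ih (i + 1) 0 le_rfl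

theorem runLenB_le (l : List Int) : runLenB l ≤ l.length := by
  induction l with
  | nil => simp [runLenB]
  | cons x rest ih => by_cases hx : x = -1 <;> simp [runLenB, hx] <;> omega

-- After dropping the leading free run, the suffix is empty or starts with an occupied cell.
theorem drop_runLenB (l : List Int) :
    l.drop (runLenB l) = [] ∨ ∃ y t, l.drop (runLenB l) = y :: t ∧ y ≠ -1 := by
  induction l with
  | nil => left; simp [runLenB]
  | cons x rest ih =>
    by_cases hx : x = -1
    · simpa [runLenB, hx] using ih
    · right; exact ⟨x, rest, by simp [runLenB, hx], hx⟩

-- If the current run completes the needed count, A succeeds at i - blocks.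
theorem goA_success (n : Int) :
    ∀ (rest : List Int) (i blocks : Int), 0 ≤ blocks → blocks < n →
      n ≤ blocks + (runLenB rest : Int) → goA n rest i blocks = i - blocks := by
  intro rest
  induction rest with
  | nil => intro i blocks _ hlt hge; simp [runLenB] at hge; omega
  | cons x rest ih =>
    intro i blocks hb hlt hge
    by_cases hx : x = -1
    · simp only [goA, if_pos hx]
      by_cases hdone : blocks + 1 = n
      · simp only [if_pos hdone]; omega
      · simp only [if_neg hdone]
        have hrun : runLenB (x :: rest) = runLenB rest + 1 := by simp [runLenB, hx]
        rw [ih (i + 1) (blocks + 1) (by omega) (by omega) (by rw [hrun] at hge; push_cast at hge ⊢; omega)]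
        omega
    · exfalso
      have : runLenB (x :: rest) = 0 := by simp [runLenB, hx]
      rw [this] at hge; simp at hge; omega
-- If the run is too short, A consumes it, ending with the counter grown by the run length.
theorem goA_consume (n : Int) :
    ∀ (rest : List Int) (i blocks : Int), 0 ≤ blocks →
      blocks + (runLenB rest : Int) < n →
      goA n rest i blocks
        = goA n (rest.drop (runLenB rest)) (i + (runLenB rest : Int)) (blocks + (runLenB rest : Int)) := by
  intro rest
  induction rest with
  | nil => intro i blocks _ _; simp [runLenB]
  | cons x rest ih =>
    intro i blocks hb hlt
    by_cases hx : x = -1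
    · have hrun : runLenB (x :: rest) = runLenB rest + 1 := by simp [runLenB, hx]
      rw [hrun] at hlt ⊢
      push_cast at hlt ⊢
      simp only [goA, if_pos hx]
      have hne : ¬ (blocks + 1 = n) := by omega
      simp only [if_neg hne]
      rw [ih (i + 1) (blocks + 1) (by omega) (by omega)]
      have : (x :: rest).drop (runLenB rest + 1) = rest.drop (runLenB rest) := by simp
      rw [this]
      ring_nf
    · have hrun : runLenB (x :: rest) = 0 := by simp [runLenB, hx]
      rw [hrun]; simp

-- Main equivalence between the two loops, entered at the start of a fresh run (blocks = 0).
theorem goA_eq_goB (n : Int) (hn : 1 ≤ n) :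
    ∀ (rest : List Int) (i : Int), goA n rest i 0 = goB n rest i := by
  intro rest
  induction hl : rest.length using Nat.strong_induction_on generalizing rest with
  | _ len ih =>
  intro i
  match rest with
  | [] => simp [goA, goB]
  | x :: rest' =>
    by_cases hx : x = -1
    · subst hx
      by_cases hbig : n ≤ ((runLenB ((-1 : Int) :: rest') : Nat) : Int)
      · rw [goA_success n ((-1 : Int) :: rest') i 0 le_rfl (by omega) (by omega)]
        rw [goB]; simp [hbig]
      · have hlt : (0 : Int) + (runLenB ((-1 : Int) :: rest') : Int) < n := by omega
        rw [goA_consume n ((-1 : Int) :: rest') i 0 le_rfl hlt]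
        rw [goB]; simp only [if_neg hbig]
        rcases drop_runLenB ((-1 : Int) :: rest') with hnil | ⟨y, t, hdrop, hy⟩
        · rw [hnil]; simp [goA, goB]
        · rw [hdrop]
          rw [show goA n (y :: t) (i + (runLenB ((-1 : Int) :: rest') : Int)) (0 + (runLenB ((-1 : Int) :: rest') : Int))
                = goA n t (i + (runLenB ((-1 : Int) :: rest') : Int) + 1) 0 from by
              simp only [goA, if_neg hy]]
          have hlen : t.length < len := by
            have h1 := runLenB_pos_of_head (-1) rest' rfl
            have h3 := runLenB_le ((-1 : Int) :: rest')
            have h2 : (((-1 : Int) :: rest').drop (runLenB ((-1 : Int) :: rest'))).length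
                = ((-1 : Int) :: rest').length - runLenB ((-1 : Int) :: rest') := by simp
            rw [hdrop] at h2
            simp at h2 h3 hl
            omega
          rw [ih t.length hlen t rfl (i + (runLenB ((-1 : Int) :: rest') : Int) + 1)]
          rw [show goB n (y :: t) (i + (runLenB ((-1 : Int) :: rest') : Int))
                = goB n t (i + (runLenB ((-1 : Int) :: rest') : Int) + 1) from by
              rw [goB]; simp [hy]]
          simp
    · rw [show goA n (x :: rest') i 0 = goA n rest' (i + 1) 0 from by simp [goA, hx]]
      rw [ih rest'.length (by simp [← hl]) rest' rfl (i + 1)]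
      rw [goB]; simp [hx]

-- ===== VERDICT (by name: the statement is the Claim_ definition above) =====
theorem find_empty_space_spec : Claim_equal_find_empty_space := by
  intro disk_array blocks_needed _
  unfold Spec_find_empty_space find_empty_space find_empty_space_alt
  by_cases hn : blocks_needed < 1
  · simp only [if_pos hn]
    exact goA_neg blocks_needed hn disk_array 0 0 le_rfl
  · simp only [if_neg hn]
    exact goA_eq_goB blocks_needed (by omega) disk_array 0
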